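-- pv_equiv track=rewrite | github.com/FinalisCore/finalis-core | scripts/check_partner_api_governance.py | first_changelog_entry
-- ===== SOURCE A (Python) =====
-- from typing import Dict, List, Set, Tuple
--
-- def first_changelog_entry(changelog_text: str) -> Tuple[str, str]:
--     lines = changelog_text.splitlines()
--     header_idx = -1
--     header = ""
--     for i, line in enumerate(lines):
--         if line.startswith("## "):
--             header_idx = i
--             header = line
--             break
--     if header_idx == -1:
--         return "", ""
--     end = len(lines)
--     for j in range(header_idx + 1, len(lines)):
--         if lines[j].startswith("## "):
--             end = j
--             break
--     body = "\n".join(lines[header_idx + 1 : end]).strip()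
--     return header, body
-- ===== SOURCE B (Python) =====
-- def first_changelog_entry(changelog_text):
--     header = None
--     body_lines = []
--     collecting = False
--     for line in changelog_text.splitlines():
--         if header is None:
--             if line.startswith("## "):
--                 header = line
--                 collecting = True
--         elif collecting:
--             if line.startswith("## "):
--                 collecting = False
--             else:
--                 body_lines.append(line)
--     if header is None:
--         return "", ""
--     return header, "\n".join(body_lines).strip()
-- ===== Notes on version B (the rewrite author's own statement) =====
-- stated objective: simpler
-- what changed: Replaces A's two sequential scans (index hunt for the first '## ' header, then a ranged scan for the next header plus a slice) with one pass over splitlines() maintaining a header, a collecting flag and a body buffer.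
import Mathlib
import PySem

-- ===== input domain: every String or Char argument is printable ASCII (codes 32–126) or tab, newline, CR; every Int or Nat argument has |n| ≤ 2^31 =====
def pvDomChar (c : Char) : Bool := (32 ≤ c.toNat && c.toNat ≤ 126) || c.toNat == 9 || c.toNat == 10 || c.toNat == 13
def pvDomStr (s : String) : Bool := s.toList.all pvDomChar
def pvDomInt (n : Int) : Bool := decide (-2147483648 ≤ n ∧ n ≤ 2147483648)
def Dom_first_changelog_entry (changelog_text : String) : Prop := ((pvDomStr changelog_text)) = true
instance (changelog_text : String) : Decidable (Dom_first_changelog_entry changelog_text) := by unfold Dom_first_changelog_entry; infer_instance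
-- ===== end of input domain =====

-- B fuses A's two sequential scans into one pass over the lines with a header/flag/buffer state; same results, same O(n) cost.


-- ===== PORT A =====
-- A's first loop: enumerate(lines), break at the first line starting with "## "; returns (index, line).
def pvFindHeaderA : List String → Nat → Option (Nat × String)
  | [], _ => none
  | l :: ls, i => if PySem.Str.startswith l "## " then some (i, l) else pvFindHeaderA ls (i + 1)

-- A's second loop: scan forward from header_idx+1 until the next "## " line (offset relative to that point).
def pvFindEndA : List String → Option Nat
  | [] => none
  | l :: ls => if PySem.Str.startswith l "## " then some 0 else (pvFindEndA ls).map (· + 1)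

def first_changelog_entry (changelog_text : String) : String × String :=
  let lines := PySem.Str.splitlines changelog_text
  match pvFindHeaderA lines 0 with
  | none => ("", "")
  | some (header_idx, header) =>
    let rest := lines.drop (header_idx + 1)
    let e := match pvFindEndA rest with
      | none => rest.length
      | some k => k
    (header, PySem.Str.strip (PySem.Str.join "\n" (rest.take e)))

-- ===== PORT B =====
-- B's single-pass state: (header found so far, collected body lines, collecting flag).
def pvStepB (st : Option String × List String × Bool) (line : String) :
    Option String × List String × Bool :=
  match st with
  | (none, body, _) =>
    if PySem.Str.startswith line "## " then (some line, body, true) else (none, body, false)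
  | (some h, body, true) =>
    if PySem.Str.startswith line "## " then (some h, body, false)
    else (some h, body ++ [line], true)
  | (some h, body, false) => (some h, body, false)

def first_changelog_entry_alt (changelog_text : String) : String × String :=
  match (PySem.Str.splitlines changelog_text).foldl pvStepB (none, [], false) with
  | (none, _, _) => ("", "")
  | (some h, body, _) => (h, PySem.Str.strip (PySem.Str.join "\n" body))

-- ===== PRECONDITION & SPEC =====
def Spec_first_changelog_entry (changelog_text : String) (out : String × String) : Prop := out = first_changelog_entry_alt changelog_text
instance (changelog_text : String) (out : String × String) : Decidable (Spec_first_changelog_entry changelog_text out) := by unfold Spec_first_changelog_entry; infer_instance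

-- ===== CLAIM (what is proved, stated in full; the proofs are below) =====
def Claim_equal_first_changelog_entry : Prop := ∀ (changelog_text : String), Dom_first_changelog_entry changelog_text → Spec_first_changelog_entry changelog_text (first_changelog_entry changelog_text)

-- ===== LEMMAS AND PROOFS =====

-- Once B's state is no longer collecting, the fold leaves it unchanged.
theorem pv_fold_done (ls : List String) (h : String) (body : List String) :
    ls.foldl pvStepB (some h, body, false) = (some h, body, false) := by
  induction ls with
  | nil => rfl
  | cons l ls ih => simpa [pvStepB] using ih

-- While collecting, the fold appends exactly the lines before the next "## " header.
theorem pv_fold_collect (ls : List String) (h : String) (body : List String) :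
    ∃ b, ls.foldl pvStepB (some h, body, true)
      = (some h, body ++ ls.takeWhile (fun l => !PySem.Str.startswith l "## "), b) := by
  induction ls generalizing body with
  | nil => exact ⟨true, by simp⟩
  | cons l ls ih =>
    by_cases hl : PySem.Chars.startswith l.toList ['#', '#', ' '] = true
    · exact ⟨false, by simp [pvStepB, hl, pv_fold_done]⟩
    · obtain ⟨b, hb⟩ := ih (body ++ [l])
      exact ⟨b, by simp [pvStepB, hl, hb]⟩

-- A's slice up to the next header equals a takeWhile.
theorem pv_take_end (ls : List String) :
    ls.take (match pvFindEndA ls with | none => ls.length | some k => k)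
      = ls.takeWhile (fun l => !PySem.Str.startswith l "## ") := by
  induction ls with
  | nil => rfl
  | cons l ls ih =>
    by_cases hl : PySem.Str.startswith l "## " = true
    · have hl2 : PySem.Chars.startswith l.toList ['#', '#', ' '] = true := by simpa using hl
      rw [show pvFindEndA (l :: ls) = some 0 from by rw [pvFindEndA, if_pos hl]]
      simp [hl2]
    · have hl2 : PySem.Chars.startswith l.toList ['#', '#', ' '] = false := by simpa using hl
      rw [show pvFindEndA (l :: ls) = (pvFindEndA ls).map (· + 1) from by
        rw [pvFindEndA, if_neg hl]]
      cases he : pvFindEndA ls with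
      | none => rw [he] at ih; simp at ih; simp [hl2, ← ih]
      | some k => rw [he] at ih; simp at ih; simp [hl2, ih]

-- Shifting the enumeration index shifts the returned index.
theorem pv_findHeader_shift (ls : List String) (i : Nat) :
    pvFindHeaderA ls (i + 1) = (pvFindHeaderA ls i).map (fun p => (p.1 + 1, p.2)) := by
  induction ls generalizing i with
  | nil => rfl
  | cons l ls ih =>
    rw [pvFindHeaderA, pvFindHeaderA]
    by_cases hl : PySem.Str.startswith l "## " = true
    · rw [if_pos hl, if_pos hl]; rfl
    · rw [if_neg hl, if_neg hl, ih]

-- Main lemma: A's two-scan computation equals B's single fold, over an arbitrary line list.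
theorem pv_main (lines : List String) :
    (match pvFindHeaderA lines 0 with
     | none => ("", "")
     | some (header_idx, header) =>
       let rest := lines.drop (header_idx + 1)
       let e := match pvFindEndA rest with
         | none => rest.length
         | some k => k
       (header, PySem.Str.strip (PySem.Str.join "\n" (rest.take e))))
    = (match lines.foldl pvStepB (none, [], false) with
       | (none, _, _) => ("", "")
       | (some h, body, _) => (h, PySem.Str.strip (PySem.Str.join "\n" body))) := by
  induction lines with
  | nil => rfl
  | cons l ls ih =>
    rw [List.foldl_cons,
      show pvStepB (none, [], false) l
        = if PySem.Str.startswith l "## " then (some l, [], true) else (none, [], false) from rfl]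
    by_cases hl : PySem.Str.startswith l "## " = true
    · obtain ⟨b, hb⟩ := pv_fold_collect ls l []
      rw [show pvFindHeaderA (l :: ls) 0 = some (0, l) from by rw [pvFindHeaderA, if_pos hl],
        if_pos hl, hb]
      simp only [List.drop_succ_cons, List.drop_zero, List.nil_append]
      rw [← pv_take_end ls]
    · rw [show pvFindHeaderA (l :: ls) 0 = pvFindHeaderA ls (0 + 1) from by
        rw [pvFindHeaderA, if_neg hl], pv_findHeader_shift, if_neg hl]
      cases hfh : pvFindHeaderA ls 0 with
      | none => rw [hfh] at ih; simpa [hfh] using ih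
      | some p =>
        obtain ⟨j, hdr⟩ := p
        rw [hfh] at ih
        simpa [hfh] using ih

-- ===== VERDICT (by name: the statement is the Claim_ definition above) =====
theorem first_changelog_entry_spec : Claim_equal_first_changelog_entry := by
  intro s _
  unfold Spec_first_changelog_entry first_changelog_entry first_changelog_entry_alt
  exact pv_main (PySem.Str.splitlines s)
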